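-- pv_equiv track=rewrite | github.com/mralexandior/compare | compare_alex_ver.py | get_prior_keys_list
-- ===== SOURCE A (Python) =====
-- def get_prior_keys_list(lines1: list) -> list:
--     """get prioritized keys list
--     Args:
--         lines1 (list): a list of records
--     Returns:
--         list: a list of field numbers, wich can be used as diff keys, sorted by unique.
--         More unique fields are placed in the beginning. non unique fields will not be added"""
--     field_sets_dict = {}
--     field_lengths_dict = {}
--     prior_keys_list = []
--     # creating a dict: key - field number, value - field value
--     # keep a set of values for each field number
--     for line in lines1:
--         for n, field in enumerate(line):
--             if n not in field_sets_dict: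
--                 field_sets_dict[n] = set()
--                 field_sets_dict[n].add(field)
--             else:
--                 field_sets_dict[n].add(field)
--
--     # creating a dict: key - length of set, value - field number
--     # keep number of fields, combined together, according length of their field value sets
--     for k, v in field_sets_dict.items():
--         set_len = len(v)
--         if set_len not in field_lengths_dict:
--             field_lengths_dict[set_len] = [k]
--         else:
--             field_lengths_dict[set_len].append(k)
--
--     # creating a list of field numbers, sorted by unique, keys with same unique appends
--     # one by one as it goes
--     for k, v in sorted(field_lengths_dict.items(), reverse=True):
--         if k == 1:
--             continue
--         for item in v:
--             prior_keys_list.append(item)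
--
--     return prior_keys_list
-- ===== SOURCE B (Python) =====
-- def _column(lines1, n):
--     return [line[n] for line in lines1 if n < len(line)]
--
-- def _distinct(col):
--     return sum(1 for i, v in enumerate(col) if v not in col[:i])
--
-- def get_prior_keys_list(lines1: list) -> list:
--     """Column-major re-implementation: slice each column out of the rows and count its
--     distinct values by counting first occurrences (no dict, no sets); keep columns with
--     more than one distinct value, stably sorted by descending distinct count."""
--     width = max((len(line) for line in lines1), default=0)
--     ranked = []
--     for n in range(width):
--         d = _distinct(_column(lines1, n))
--         if d > 1:
--             ranked.append((n, d))
--     ranked.sort(key=lambda p: -p[1])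
--     return [n for n, _ in ranked]
-- ===== Notes on version B (the rewrite author's own statement) =====
-- stated objective: alternative
-- what changed: B traverses column-major instead of row-major: no dict and no sets at all - it slices each column out of the rows, counts distinct values by counting first occurrences against the column prefix, and orders the surviving columns with one stable sort by negated count, replacing A's field->set dict, length->fields grouping dict and descending bucket walk.
import Mathlib
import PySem

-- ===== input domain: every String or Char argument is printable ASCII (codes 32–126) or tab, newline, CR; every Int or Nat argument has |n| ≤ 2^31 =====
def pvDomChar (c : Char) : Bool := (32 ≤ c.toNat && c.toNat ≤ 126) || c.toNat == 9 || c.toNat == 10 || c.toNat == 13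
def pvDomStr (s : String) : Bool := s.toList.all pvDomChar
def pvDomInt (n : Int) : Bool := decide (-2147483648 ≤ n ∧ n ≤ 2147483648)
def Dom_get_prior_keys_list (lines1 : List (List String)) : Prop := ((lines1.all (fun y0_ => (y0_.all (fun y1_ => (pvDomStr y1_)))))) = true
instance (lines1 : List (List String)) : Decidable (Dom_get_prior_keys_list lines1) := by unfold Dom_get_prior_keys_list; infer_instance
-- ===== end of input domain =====

-- B is column-major and set-free: it slices each column out of the rows, counts distinct
-- values by counting first occurrences, and orders columns by one stable sort (objective:
-- alternative — same result, different algorithm; not faster).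

-- ===== PORT A =====
def get_prior_keys_list (lines1 : List (List String)) : List Int :=
  let field_sets_dict : PySem.Dict Int (PySem.Set String) :=
    lines1.foldl (fun d line =>
      (PySem.List.enumerate line 0).foldl (fun d nf =>
        if d.contains nf.1 = false then
          -- field_sets_dict[n] = set(); field_sets_dict[n].add(field)
          (d.insert nf.1 PySem.Set.empty).modify nf.1 PySem.Set.empty
            (fun s => PySem.Set.add s nf.2)
        else
          -- field_sets_dict[n].add(field)
          d.modify nf.1 PySem.Set.empty (fun s => PySem.Set.add s nf.2)) d)
      PySem.Dict.empty
  let field_lengths_dict : PySem.Dict Int (List Int) :=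
    field_sets_dict.items.foldl (fun g kv =>
      if g.contains (PySem.Set.len kv.2) = false then
        g.insert (PySem.Set.len kv.2) [kv.1]
      else
        g.modify (PySem.Set.len kv.2) [] (fun l => l ++ [kv.1]))
      PySem.Dict.empty
  -- sorted(field_lengths_dict.items(), reverse=True): dict keys are pairwise distinct, so
  -- Python's tuple comparison is decided by the first components; keying by fst is exact here
  let sortedItems := PySem.List.sorted field_lengths_dict.items (fun p => p.1) true
  sortedItems.foldl (fun acc kv => if kv.1 == 1 then acc else acc ++ kv.2) []

-- ===== PORT B =====
-- _column(lines1, n) = [line[n] for line in lines1 if n < len(line)]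
-- (the guard keeps the index in range, so the pyGetD default is never used)
def pvColumn (lines1 : List (List String)) (n : Int) : List String :=
  (lines1.filter (fun line => decide (n < (line.length : Int)))).map
    (fun line => PySem.List.pyGetD line n "")

-- _distinct(col) = sum(1 for i, v in enumerate(col) if v not in col[:i])
def pvDistinct (col : List String) : Int :=
  (PySem.List.enumerate col 0).foldl (fun c iv =>
    if (PySem.List.slice col none (some iv.1)).contains iv.2 then c else c + 1) 0

def get_prior_keys_list_alt (lines1 : List (List String)) : List Int :=
  let width : Int :=
    PySem.List.maxD (lines1.map (fun line => (line.length : Int))) (fun x => x) 0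
  let ranked : List (Int × Int) :=
    (PySem.List.pyRange 0 width 1).foldl (fun acc n =>
      if 1 < pvDistinct (pvColumn lines1 n) then
        acc ++ [(n, pvDistinct (pvColumn lines1 n))]
      else acc) []
  (PySem.List.sorted ranked (fun p => -p.2) false).map (fun p => p.1)

-- ===== PRECONDITION & SPEC =====
def Spec_get_prior_keys_list (lines1 : List (List String)) (out : List Int) : Prop := out = get_prior_keys_list_alt lines1
instance (lines1 : List (List String)) (out : List Int) : Decidable (Spec_get_prior_keys_list lines1 out) := by unfold Spec_get_prior_keys_list; infer_instance

-- ===== CLAIM (what is proved, stated in full; the proofs are below) =====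
def Claim_equal_get_prior_keys_list : Prop := ∀ (lines1 : List (List String)), Dom_get_prior_keys_list lines1 → Spec_get_prior_keys_list lines1 (get_prior_keys_list lines1)

-- ===== LEMMAS AND PROOFS =====

-- A's value-collecting step: d[n].add(field) with a fresh set on first sight of n.
def pvStep (d : PySem.Dict Int (PySem.Set String)) (q : Int × String) :
    PySem.Dict Int (PySem.Set String) :=
  d.modify q.1 PySem.Set.empty (fun s => PySem.Set.add s q.2)

-- The field→set dictionary A builds, over the flattened enumerated input.
def pvDict (lines1 : List (List String)) : PySem.Dict Int (PySem.Set String) :=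
  (lines1.flatMap (fun line => PySem.List.enumerate line 0)).foldl pvStep PySem.Dict.empty

-- A's tail as a function of the items of that dictionary.
def pvPostA (L : List (Int × PySem.Set String)) : List Int :=
  let g : PySem.Dict Int (List Int) :=
    L.foldl (fun g kv =>
      if g.contains (PySem.Set.len kv.2) = false then
        g.insert (PySem.Set.len kv.2) [kv.1]
      else
        g.modify (PySem.Set.len kv.2) [] (fun l => l ++ [kv.1])) PySem.Dict.empty
  (PySem.List.sorted g.items (fun p => p.1) true).foldl
    (fun acc kv => if kv.1 == 1 then acc else acc ++ kv.2) []

-- B's result as a function of the items of that dictionary.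
def pvPostB (L : List (Int × PySem.Set String)) : List Int :=
  (PySem.List.sorted
      ((L.filter (fun p => 1 < PySem.Set.len p.2)).map (fun p => (p.1, PySem.Set.len p.2)))
      (fun q => -q.2) false).map (fun q => q.1)

lemma stepA_eq (d : PySem.Dict Int (PySem.Set String)) (q : Int × String) :
    (if d.contains q.1 = false then
      (d.insert q.1 PySem.Set.empty).modify q.1 PySem.Set.empty (fun s => PySem.Set.add s q.2)
     else d.modify q.1 PySem.Set.empty (fun s => PySem.Set.add s q.2)) = pvStep d q := by
  unfold pvStep PySem.Dict.modify
  split_ifs with h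
  · rw [PySem.Dict.getD_insert_self, PySem.Dict.insert_insert_self,
      PySem.Dict.getD_of_not_contains d _ h]
  · rfl

lemma dictA_eq (lines1 : List (List String)) :
    lines1.foldl (fun d line =>
      (PySem.List.enumerate line 0).foldl (fun d nf =>
        if d.contains nf.1 = false then
          (d.insert nf.1 PySem.Set.empty).modify nf.1 PySem.Set.empty
            (fun s => PySem.Set.add s nf.2)
        else
          d.modify nf.1 PySem.Set.empty (fun s => PySem.Set.add s nf.2)) d)
      PySem.Dict.empty = pvDict lines1 := by
  unfold pvDict
  rw [List.foldl_flatMap]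
  apply PySem.List.foldl_congr_mem
  intro d line _
  apply PySem.List.foldl_congr_mem
  intro d' q _
  exact stepA_eq d' q

lemma portA_eq (lines1 : List (List String)) :
    get_prior_keys_list lines1 = pvPostA (pvDict lines1).items := by
  unfold get_prior_keys_list pvPostA
  dsimp only
  rw [dictA_eq]

lemma add_ne_nil {α : Type} [BEq α] (s : PySem.Set α) (x : α) : PySem.Set.add s x ≠ [] := by
  unfold PySem.Set.add
  split_ifs with h
  · intro hs
    subst hs
    simp [PySem.Set.contains] at h
  · simp

lemma update_ne_nil {α : Type} [BEq α] (s : PySem.Set α) (l : List α) (hl : l ≠ []) :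
    PySem.Set.update s l ≠ [] := by
  induction l generalizing s with
  | nil => exact absurd rfl hl
  | cons x t ih =>
    show PySem.Set.update (PySem.Set.add s x) t ≠ []
    cases t with
    | nil => exact add_ne_nil s x
    | cons y u => exact ih (PySem.Set.add s x) (by simp)

-- getD of the value-collecting fold: the set of all values seen at that field.
lemma getD_pvDict_fold (E : List (Int × String)) (d : PySem.Dict Int (PySem.Set String))
    (n : Int) :
    (E.foldl pvStep d).getD n PySem.Set.empty =
      PySem.Set.update (d.getD n PySem.Set.empty)
        ((E.filter (fun q => q.1 == n)).map (fun q => q.2)) := by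
  induction E generalizing d with
  | nil => rfl
  | cons q E ih =>
    rw [List.foldl_cons, ih]
    by_cases h : q.1 = n
    · subst h
      simp only [List.filter_cons, beq_self_eq_true, if_pos, List.map_cons]
      show PySem.Set.update ((pvStep d q).getD q.1 PySem.Set.empty) _ =
        PySem.Set.update (PySem.Set.add (d.getD q.1 PySem.Set.empty) q.2) _
      unfold pvStep
      rw [PySem.Dict.getD_modify_self]
    · have hb : (q.1 == n) = false := by simpa using h
      simp only [List.filter_cons, hb, Bool.false_eq_true, ite_false]
      unfold pvStep
      rw [PySem.Dict.getD_modify]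
      simp [Ne.symm h]

lemma keys_pvDict (lines1 : List (List String)) :
    (pvDict lines1).keys =
      PySem.Set.ofList ((lines1.flatMap (fun line => PySem.List.enumerate line 0)).map
        (fun q => q.1)) := by
  unfold pvDict pvStep
  have h := PySem.Dict.keys_foldl_modify_key
    (lines1.flatMap (fun line => PySem.List.enumerate line 0))
    (fun q : Int × String => q.1) PySem.Set.empty
    (fun _ q => fun s => PySem.Set.add s q.2) PySem.Dict.empty
  simpa [PySem.Set.update_nil_left] using h

lemma nodup_keys_pvDict (lines1 : List (List String)) : (pvDict lines1).keys.Nodup := by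
  rw [keys_pvDict]
  exact PySem.Set.nodup_ofList _

-- every set stored in the dictionary is nonempty: its field number was seen at least once
lemma pos_len_pvDict (lines1 : List (List String)) :
    ∀ p ∈ (pvDict lines1).items, 1 ≤ PySem.Set.len p.2 := by
  intro p hp
  have hkey : p.1 ∈ (pvDict lines1).keys := PySem.Dict.mem_keys_of_mem_items _ hp
  have hp' : (p.1, p.2) ∈ (pvDict lines1).items := by simpa using hp
  have hgetD : (pvDict lines1).getD p.1 PySem.Set.empty = p.2 :=
    PySem.Dict.getD_of_mem_items _ hp' (nodup_keys_pvDict lines1) PySem.Set.empty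
  rw [keys_pvDict, PySem.Set.mem_ofList] at hkey
  rcases List.mem_map.mp hkey with ⟨q, hqE, hq1⟩
  have hfil : (((lines1.flatMap (fun line => PySem.List.enumerate line 0)).filter
      (fun q => q.1 == p.1)).map (fun q => q.2)) ≠ [] := by
    simp only [ne_eq, List.map_eq_nil_iff, List.filter_eq_nil_iff, not_forall]
    exact ⟨q, hqE, by simp [hq1]⟩
  have : p.2 ≠ [] := by
    rw [← hgetD]
    unfold pvDict
    rw [getD_pvDict_fold]
    have : (PySem.Dict.empty : PySem.Dict Int (PySem.Set String)).getD p.1 PySem.Set.empty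
        = PySem.Set.empty := rfl
    rw [this]
    exact update_ne_nil _ _ hfil
  unfold PySem.Set.len
  have : p.2.length ≠ 0 := fun h => this (List.eq_nil_of_length_eq_zero h)
  omega

-- ---- stable sort as a concatenation of key buckets ----

lemma insertBy_append_left {α : Type} (before : α → α → Bool) (x : α) (l1 l2 : List α)
    (h : ∀ y ∈ l1, before x y = false) :
    PySem.List.insertBy before x (l1 ++ l2) = l1 ++ PySem.List.insertBy before x l2 := by
  induction l1 with
  | nil => simp
  | cons y t ih =>
    simp only [List.cons_append, PySem.List.insertBy]
    rw [h y (by simp), ih (fun z hz => h z (by simp [hz]))]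
    simp

lemma insertBy_front {α : Type} (before : α → α → Bool) (x : α) (l : List α)
    (h : ∀ y ∈ l, before x y = true) :
    PySem.List.insertBy before x l = x :: l := by
  cases l with
  | nil => rfl
  | cons y t => simp [PySem.List.insertBy, h y (by simp)]

lemma insertBy_key_buckets (key : (Int × Int) → Int) (x : Int × Int) (ks : List Int)
    (b : Int → List (Int × Int)) (hks : ks.Pairwise (· < ·))
    (hb : ∀ k ∈ ks, ∀ y ∈ b k, key y = k) (hx : key x ∈ ks) :
    PySem.List.insertBy (fun a y => decide (key a < key y)) x (ks.flatMap b) =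
      ks.flatMap (fun k => b k ++ if key x == k then [x] else []) := by
  induction ks with
  | nil => simp at hx
  | cons k ks ih =>
    have hklt : ∀ k' ∈ ks, k < k' := fun k' h => List.rel_of_pairwise_cons hks h
    by_cases hkx : key x = k
    · have hbk : ∀ y ∈ b k, (decide (key x < key y)) = false := fun y hy => by
        have := hb k (by simp) y hy
        simp [this, hkx]
      have hrestmem : ∀ y ∈ ks.flatMap b, (decide (key x < key y)) = true := fun y hy => by
        rcases List.mem_flatMap.mp hy with ⟨k', hk', hyk'⟩
        have hky := hb k' (by simp [hk']) y hyk'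
        simp only [decide_eq_true_eq, hky, hkx]
        exact hklt k' hk'
      have hrest : ks.flatMap (fun k' => b k' ++ if key x == k' then [x] else []) =
          ks.flatMap b := by
        apply List.flatMap_congr
        intro k' hk'
        have : (key x == k') = false := by
          have := hklt k' hk'
          simp only [beq_eq_false_iff_ne, ne_eq, hkx]
          omega
        simp [this]
      simp only [List.flatMap_cons]
      rw [insertBy_append_left _ _ _ _ hbk, insertBy_front _ _ _ hrestmem, hrest]
      have hxk : (key x == k) = true := by simp [hkx]
      simp [hxk]
    · have hx' : key x ∈ ks := by
        rcases List.mem_cons.mp hx with h | h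
        · exact absurd h hkx
        · exact h
      simp only [List.flatMap_cons]
      rw [insertBy_append_left _ _ _ _ (fun y hy => by
        have hky := hb k (by simp) y hy
        have : k < key x := hklt _ hx'
        simp [hky]; omega)]
      rw [ih hks.of_cons (fun k' hk' => hb k' (by simp [hk'])) hx']
      have : (key x == k) = false := by simpa using hkx
      simp [this]

lemma sorted_buckets (xs : List (Int × Int)) (key : (Int × Int) → Int) (ks : List Int)
    (hks : ks.Pairwise (· < ·)) (hcov : ∀ x ∈ xs, key x ∈ ks) :
    PySem.List.sorted xs key false =
      ks.flatMap (fun k => xs.filter (fun x => key x == k)) := by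
  induction xs using List.reverseRecOn with
  | nil =>
    have h1 : PySem.List.sorted ([] : List (Int × Int)) key false = [] :=
      (PySem.List.sorted_eq_nil_iff _ _ _).mpr rfl
    rw [h1]
    exact (List.flatMap_eq_nil_iff.mpr (by simp)).symm
  | append_singleton xs x ih =>
    rw [PySem.List.sorted_eq_foldl_insertBy, List.foldl_append, List.foldl_cons,
      List.foldl_nil, ← PySem.List.sorted_eq_foldl_insertBy,
      ih (fun y hy => hcov y (by simp [hy]))]
    rw [insertBy_key_buckets key x ks _ hks
      (fun k _ y hy => by simpa using (List.mem_filter.mp hy).2)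
      (hcov x (by simp))]
    apply List.flatMap_congr
    intro k _
    rw [List.filter_append]
    cases h : (key x == k) <;> simp [h]

-- ---- A's tail = the sorted-pairs form on any items list with nonempty sets ----

lemma post_eq (L : List (Int × PySem.Set String))
    (hpos : ∀ p ∈ L, 1 ≤ PySem.Set.len p.2) : pvPostA L = pvPostB L := by
  unfold pvPostA pvPostB
  dsimp only
  -- the grouping loop is a modify-append fold over (len, field) pairs
  have hg : L.foldl (fun g kv =>
      if g.contains (PySem.Set.len kv.2) = false then
        g.insert (PySem.Set.len kv.2) [kv.1]
      else
        g.modify (PySem.Set.len kv.2) [] (fun l => l ++ [kv.1])) PySem.Dict.empty =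
      (L.map (fun p => (PySem.Set.len p.2, p.1))).foldl
        (fun g p => g.modify p.1 [] (fun l => l ++ [p.2])) PySem.Dict.empty := by
    rw [List.foldl_map]
    apply PySem.List.foldl_congr_mem
    intro g kv _
    split_ifs with h
    · unfold PySem.Dict.modify
      rw [PySem.Dict.getD_of_not_contains g _ h]
      simp
    · rfl
  rw [hg]
  set L' := L.map (fun p => (PySem.Set.len p.2, p.1)) with hL'
  set g := L'.foldl (fun g p => g.modify p.1 [] (fun l => l ++ [p.2])) PySem.Dict.empty with hgdef
  have hgetD : ∀ c, g.getD c [] = (L'.filter (fun p => p.1 == c)).map (fun p => p.2) := by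
    intro c
    rw [hgdef, PySem.Dict.getD_foldl_modify_append]
    rfl
  have hkeys : g.keys = PySem.Set.ofList (L'.map (fun p => p.1)) := by
    rw [hgdef, PySem.Dict.keys_foldl_modify_key L' (fun p => p.1) [] (fun _ p => fun l => l ++ [p.2])]
    simp [PySem.Set.update_nil_left]
  have hnodup : g.keys.Nodup := by rw [hkeys]; exact PySem.Set.nodup_ofList _
  have hitems : g.items = g.keys.map (fun c => (c, g.getD c [])) :=
    PySem.Dict.items_eq_map_keys g hnodup []
  -- the descending distinct lengths
  set ds := PySem.List.sorted (PySem.Set.ofList (L'.map (fun p => p.1))) (fun c => c) true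
    with hds
  have hdsperm : ds.Perm (PySem.Set.ofList (L'.map (fun p => p.1))) :=
    PySem.List.sorted_perm _ _ _
  have hdsnodup : ds.Nodup := hdsperm.nodup_iff.mpr (PySem.Set.nodup_ofList _)
  have hdsgt : ds.Pairwise (fun a b => b < a) := by
    have h1 : ds.Pairwise (fun a b => b ≤ a) := PySem.List.sorted_pairwise_rev _ _
    have h2 : ds.Pairwise (fun a b => a ≠ b) := hdsnodup
    exact (h1.and h2).imp (fun h => lt_of_le_of_ne h.1 (Ne.symm h.2))
  have hmemds : ∀ c, c ∈ ds ↔ c ∈ L'.map (fun p => p.1) := by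
    intro c
    rw [hds, PySem.List.mem_sorted, PySem.Set.mem_ofList]
  -- sorting the grouping dict's items descending = mapping over the descending lengths
  have hsorted : PySem.List.sorted g.items (fun p => p.1) true =
      ds.map (fun c => (c, g.getD c [])) := by
    apply PySem.List.sorted_rev_eq_of_perm_of_pairwise_gt
    · rw [hitems, hkeys]
      exact hdsperm.map _
    · rw [List.pairwise_map]
      exact hdsgt
  rw [hsorted]
  -- A's final loop as a flatMap over ds
  have hA : (ds.map (fun c => (c, g.getD c []))).foldl
      (fun acc kv => if kv.1 == 1 then acc else acc ++ kv.2) [] =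
      ds.flatMap (fun c => if c == 1 then [] else g.getD c []) := by
    rw [List.foldl_map]
    rw [PySem.List.foldl_congr_mem _ _
      (fun acc c => acc ++ (if c == 1 then [] else g.getD c [])) []
      (fun acc c _ => by by_cases h : c == 1 <;> simp [h])]
    rw [PySem.List.foldl_append_eq_flatMap]
    simp
  rw [hA]
  -- B's sort as a flatMap over the negated lengths > 1
  have h1pos : ∀ c ∈ ds, 1 ≤ c := by
    intro c hc
    rcases List.mem_map.mp ((hmemds c).mp hc) with ⟨p, hpL', hp1⟩
    rw [hL'] at hpL'
    rcases List.mem_map.mp hpL' with ⟨p0, hp0L, hp0⟩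
    have := hpos p0 hp0L
    rw [← hp1, ← hp0]
    simpa using this
  set pairs := (L.filter (fun p => 1 < PySem.Set.len p.2)).map
    (fun p => (p.1, PySem.Set.len p.2)) with hpairs
  have hks : ((ds.filter (fun c => c != 1)).map (fun c => -c)).Pairwise (· < ·) := by
    rw [List.pairwise_map]
    exact (hdsgt.filter _).imp (fun h => by omega)
  have hcov : ∀ x ∈ pairs, (fun q => -q.2) x ∈ (ds.filter (fun c => c != 1)).map (fun c => -c) := by
    intro x hx
    rw [hpairs] at hx
    rcases List.mem_map.mp hx with ⟨p, hpF, hpx⟩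
    have hpL := (List.mem_filter.mp hpF).1
    have hplen : 1 < PySem.Set.len p.2 := by simpa using (List.mem_filter.mp hpF).2
    apply List.mem_map.mpr
    refine ⟨PySem.Set.len p.2, ?_, by rw [← hpx]⟩
    apply List.mem_filter.mpr
    constructor
    · apply (hmemds _).mpr
      rw [hL']
      rw [List.map_map]
      exact List.mem_map.mpr ⟨p, hpL, rfl⟩
    · unfold PySem.Set.len at hplen ⊢
      simp only [bne_iff_ne, ne_eq]
      omega
  rw [sorted_buckets pairs (fun q => -q.2) _ hks hcov]
  rw [List.map_flatMap, List.flatMap_map]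
  have hfilter_flatMap : ∀ (l : List Int) (p : Int → Bool) (f : Int → List Int),
      (l.filter p).flatMap f = l.flatMap (fun c => if p c then f c else []) := by
    intro l p f
    induction l with
    | nil => rfl
    | cons c t ih => by_cases h : p c <;> simp [h, ih]
  rw [hfilter_flatMap]
  apply List.flatMap_congr
  intro c hc
  by_cases hc1 : c = 1
  · simp [hc1]
  · have hlt : 1 < c := by have := h1pos c hc; omega
    have hne : (c == 1) = false := by simp [hc1]
    have hne' : (c != 1) = true := by simp [hc1]
    rw [hne, hne']
    simp only [Bool.false_eq_true, if_false, if_true]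
    have hside1 : g.getD c [] =
        (L.filter (fun p => PySem.Set.len p.2 == c)).map (fun p => p.1) := by
      rw [hgetD, hL', List.filter_map, List.map_map]
      rfl
    have hside2 : (pairs.filter (fun x => -x.2 == -c)).map (fun q => q.1) =
        (L.filter (fun p => PySem.Set.len p.2 == c)).map (fun p => p.1) := by
      rw [hpairs, List.filter_map, List.filter_filter, List.map_map]
      have hcg : ∀ p ∈ L,
          (((fun x => -x.2 == -c) ∘ fun p => (p.1, PySem.Set.len p.2)) p
            && decide (1 < PySem.Set.len p.2)) = (PySem.Set.len p.2 == c) := by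
        intro p hpL
        show (-PySem.Set.len p.2 == -c && decide (1 < PySem.Set.len p.2)) =
          (PySem.Set.len p.2 == c)
        by_cases h : PySem.Set.len p.2 = c
        · rw [h]
          have h1 : decide ((1 : Int) < c) = true := by simp [hlt]
          simp [h1]
        · have h2 : (PySem.Set.len p.2 == c) = false := by
            simp only [beq_eq_false_iff_ne, ne_eq]
            exact h
          have h3 : (-PySem.Set.len p.2 == -c) = false := by
            simp only [beq_eq_false_iff_ne, ne_eq, neg_inj]
            exact h
          rw [h2, h3]
          simp
      rw [List.filter_congr hcg]
      rfl
    rw [hside1, hside2]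

-- ---- B-side bridge: columns, first-occurrence counting, and the key range ----

-- updating a 0-based range with another 0-based range keeps a 0-based range
lemma update_range (M m : Int) (hM : 0 ≤ M) :
    PySem.Set.update (PySem.List.pyRange 0 M 1) (PySem.List.pyRange 0 m 1) =
      PySem.List.pyRange 0 (max M m) 1 := by
  rw [PySem.Set.update_eq_append_filter,
    PySem.Set.ofList_eq_self_of_nodup _ (PySem.List.nodup_pyRange_one 0 m)]
  by_cases h : m ≤ M
  · have hnil : (PySem.List.pyRange 0 m 1).filter
        (fun y => !PySem.Set.contains (PySem.List.pyRange 0 M 1) y) = [] := by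
      apply List.filter_eq_nil_iff.mpr
      intro y hy
      have := (PySem.List.mem_pyRange_one).mp hy
      simp [PySem.Set.contains_eq_listContains, List.contains_eq_mem,
        PySem.List.mem_pyRange_one]
      omega
    rw [hnil, max_eq_left h, List.append_nil]
  · have hMm : M ≤ m := by omega
    rw [max_eq_right hMm]
    rw [PySem.List.pyRange_one_append 0 M m hM hMm, List.filter_append]
    have h1 : (PySem.List.pyRange 0 M 1).filter
        (fun y => !PySem.Set.contains (PySem.List.pyRange 0 M 1) y) = [] := by
      apply List.filter_eq_nil_iff.mpr
      intro y hy
      have := (PySem.List.mem_pyRange_one).mp hy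
      simp [PySem.Set.contains_eq_listContains, List.contains_eq_mem,
        PySem.List.mem_pyRange_one]
      omega
    have h2 : (PySem.List.pyRange M m 1).filter
        (fun y => !PySem.Set.contains (PySem.List.pyRange 0 M 1) y) =
        PySem.List.pyRange M m 1 := by
      apply List.filter_eq_self.mpr
      intro y hy
      have := (PySem.List.mem_pyRange_one).mp hy
      simp [PySem.Set.contains_eq_listContains, List.contains_eq_mem,
        PySem.List.mem_pyRange_one]
      omega
    rw [h1, h2, List.nil_append]

-- the set of all seen field numbers is the 0-based range up to the running max width
lemma ofList_ranges (ls : List (List String)) :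
    PySem.Set.ofList (ls.flatMap (fun l => PySem.List.pyRange 0 (l.length : Int) 1)) =
      PySem.List.pyRange 0 (ls.foldl (fun a l => max a ((l.length : Int))) 0) 1 := by
  induction ls using List.reverseRecOn with
  | nil => rfl
  | append_singleton ls l ih =>
    rw [List.flatMap_append, List.foldl_append]
    simp only [List.flatMap_cons, List.flatMap_nil, List.append_nil, List.foldl_cons,
      List.foldl_nil]
    rw [PySem.Set.ofList_append, ih]
    exact update_range _ _ (PySem.List.le_foldl_max_int ls (fun l => (l.length : Int)) 0).1

lemma pvWidth_eq (lines1 : List (List String)) :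
    PySem.List.maxD (lines1.map (fun line => (line.length : Int))) (fun x => x) 0 =
      lines1.foldl (fun a l => max a ((l.length : Int))) 0 := by
  cases lines1 with
  | nil => rfl
  | cons l t =>
    unfold PySem.List.maxD
    rw [List.map_cons, PySem.List.max?_id_cons, Option.getD_some, List.foldl_cons,
      List.foldl_map]
    have : max (0 : Int) ((l.length : Int)) = ((l.length : Int)) := by omega
    rw [this]

lemma keys_pvDict_range (lines1 : List (List String)) :
    (pvDict lines1).keys =
      PySem.List.pyRange 0 (lines1.foldl (fun a l => max a ((l.length : Int))) 0) 1 := by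
  rw [keys_pvDict, List.map_flatMap]
  have h : ∀ line : List String,
      (PySem.List.enumerate line 0).map (fun q : Int × String => q.1) =
        PySem.List.pyRange 0 (line.length : Int) 1 := by
    intro line
    rw [PySem.List.map_fst_enumerate]
    simp
  rw [List.flatMap_congr (fun line _ => h line)]
  exact ofList_ranges lines1

-- a per-line slice of the enumerated pairs at one field number
lemma enum_filter_map (line : List String) (n : Int) (hn : 0 ≤ n) :
    ((PySem.List.enumerate line 0).filter (fun q => q.1 == n)).map (fun q => q.2) =
      if n < (line.length : Int) then [PySem.List.pyGetD line n ""] else [] := by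
  rw [PySem.List.enumerate_eq_map_pyRange line "", List.filter_map, List.map_map]
  have hc : ((fun q : Int × String => q.1 == n) ∘
      fun j => (j, PySem.List.pyGetD line j "")) = fun j => j == n := rfl
  rw [hc]
  have hl : PySem.List.len line = (line.length : Int) := rfl
  rw [hl, List.filter_beq]
  by_cases h : n < (line.length : Int)
  · have hmem : n ∈ PySem.List.pyRange 0 (line.length : Int) 1 :=
      PySem.List.mem_pyRange_one.mpr ⟨hn, h⟩
    rw [List.count_eq_one_of_mem (PySem.List.nodup_pyRange_one _ _) hmem]
    simp [h]
  · have hmem : n ∉ PySem.List.pyRange 0 (line.length : Int) 1 := by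
      intro hm
      exact h ((PySem.List.mem_pyRange_one.mp hm).2)
    rw [List.count_eq_zero_of_not_mem hmem]
    simp [h]

-- the column at field n is exactly the values the row-major pass collects at key n
lemma col_filter_eq (lines1 : List (List String)) (n : Int) (hn : 0 ≤ n) :
    ((lines1.flatMap (fun line => PySem.List.enumerate line 0)).filter
        (fun q => q.1 == n)).map (fun q => q.2) = pvColumn lines1 n := by
  induction lines1 with
  | nil => rfl
  | cons l ls ih =>
    unfold pvColumn at ih ⊢
    simp only [List.flatMap_cons, List.filter_append, List.map_append, List.filter_cons]
    rw [enum_filter_map l n hn, ih]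
    by_cases h : n < (l.length : Int)
    · simp [h]
    · simp [h]

lemma getD_pvDict (lines1 : List (List String)) (n : Int) (hn : 0 ≤ n) :
    (pvDict lines1).getD n PySem.Set.empty = PySem.Set.ofList (pvColumn lines1 n) := by
  unfold pvDict
  rw [getD_pvDict_fold, PySem.Dict.getD_empty, ← col_filter_eq lines1 n hn]
  exact PySem.Set.update_nil_left _

-- counting first occurrences against the prefix counts the distinct values
lemma pvDistinct_eq (col : List String) :
    pvDistinct col = PySem.Set.len (PySem.Set.ofList col) := by
  unfold pvDistinct
  induction col using List.reverseRecOn with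
  | nil => rfl
  | append_singleton l x ih =>
    rw [PySem.List.enumerate_append, List.foldl_append]
    have hpre : (PySem.List.enumerate l 0).foldl (fun c iv =>
        if (PySem.List.slice (l ++ [x]) none (some iv.1)).contains iv.2 then c
        else c + 1) (0 : Int) =
        (PySem.List.enumerate l 0).foldl (fun c iv =>
        if (PySem.List.slice l none (some iv.1)).contains iv.2 then c else c + 1) (0 : Int) := by
      apply PySem.List.foldl_congr_mem
      intro c iv hiv
      rcases (PySem.List.mem_enumerate_iff _ _ _).mp hiv with ⟨k, hk, hivk⟩
      subst hivk
      have h0 : (0 : Int) + (k : Int) = (k : Int) := by omega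
      rw [h0, PySem.List.slice_to _ (by positivity), PySem.List.slice_to _ (by positivity),
        Int.toNat_natCast, List.take_append_of_le_length (le_of_lt hk)]
    rw [hpre, ih]
    have h1 : PySem.List.enumerate [x] ((0 : Int) + (l.length : Int)) =
        [((l.length : Int), x)] := by
      simp [PySem.List.enumerate_cons, PySem.List.enumerate_nil]
    rw [h1, List.foldl_cons, List.foldl_nil]
    rw [PySem.List.slice_to _ (by positivity), Int.toNat_natCast, List.take_left]
    rw [PySem.Set.ofList_append_singleton, PySem.Set.add_eq_ite]
    by_cases hx : x ∈ l
    · have hx' : x ∈ PySem.Set.ofList l := by rw [PySem.Set.mem_ofList]; exact hx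
      rw [if_pos hx']
      simp [List.contains_eq_mem, hx]
    · have hx' : x ∉ PySem.Set.ofList l := fun h => hx (by rwa [PySem.Set.mem_ofList] at h)
      rw [if_neg hx']
      have : l.contains x = false := by simp [List.contains_eq_mem, hx]
      rw [this]
      unfold PySem.Set.len
      simp

lemma portB_eq (lines1 : List (List String)) :
    get_prior_keys_list_alt lines1 = pvPostB (pvDict lines1).items := by
  unfold get_prior_keys_list_alt pvPostB
  dsimp only
  rw [pvWidth_eq]
  set W := lines1.foldl (fun a l => max a ((l.length : Int))) 0 with hW
  -- B's loop over the range builds exactly the (field, distinct-count) pairs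
  have hbody : (PySem.List.pyRange 0 W 1).foldl (fun acc n =>
      if 1 < pvDistinct (pvColumn lines1 n) then
        acc ++ [(n, pvDistinct (pvColumn lines1 n))]
      else acc) [] =
      (PySem.List.pyRange 0 W 1).foldl (fun acc n =>
      if 1 < PySem.Set.len ((pvDict lines1).getD n PySem.Set.empty) then
        acc ++ [(n, PySem.Set.len ((pvDict lines1).getD n PySem.Set.empty))]
      else acc) [] := by
    apply PySem.List.foldl_congr_mem
    intro acc n hmem
    have hn : 0 ≤ n := (PySem.List.mem_pyRange_one.mp hmem).1
    rw [pvDistinct_eq, ← getD_pvDict lines1 n hn]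
  rw [hbody, PySem.List.foldl_append_ite
    (p := fun n => 1 < PySem.Set.len ((pvDict lines1).getD n PySem.Set.empty))
    (f := fun n => (n, PySem.Set.len ((pvDict lines1).getD n PySem.Set.empty)))]
  -- the items side: items are the keys (the 0-based range) paired with their sets
  rw [PySem.Dict.items_eq_map_keys (pvDict lines1) (nodup_keys_pvDict lines1) PySem.Set.empty,
    keys_pvDict_range lines1, ← hW, List.filter_map, List.map_map]
  rfl

-- ===== VERDICT (by name: the statement is the Claim_ definition above) =====
theorem get_prior_keys_list_spec : Claim_equal_get_prior_keys_list := by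
  intro lines1 _
  unfold Spec_get_prior_keys_list
  rw [portA_eq, portB_eq]
  exact post_eq _ (pos_len_pvDict lines1)
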